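-- pv_equiv track=rewrite | github.com/Wenbobobo/llms-can-compute-repro | scripts/export_p56_post_h64_clean_merge_candidate_packet.py | parse_worktree_list
-- ===== SOURCE A (Python) =====
-- def parse_worktree_list(text: str) -> list[dict[str, str]]:
--     entries: list[dict[str, str]] = []
--     current: dict[str, str] = {}
--     for raw_line in text.splitlines():
--         line = raw_line.strip()
--         if not line:
--             if current:
--                 entries.append(current)
--                 current = {}
--             continue
--         key, value = line.split(" ", 1)
--         current[key] = value.strip()
--     if current:
--         entries.append(current)
--     return [
--         {
--             "worktree": entry.get("worktree", "").replace("\\", "/"),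
--             "branch": entry.get("branch", "").removeprefix("refs/heads/"),
--         }
--         for entry in entries
--     ]
-- ===== SOURCE B (Python) =====
-- def parse_worktree_list(text: str) -> list[dict[str, str]]:
--     # Two-phase: strip all lines, group consecutive non-blank lines into
--     # records, then build each record's dict and project the two fields.
--     lines = [raw.strip() for raw in text.splitlines()]
--     records: list[list[str]] = []
--     i, n = 0, len(lines)
--     while i < n:
--         if lines[i]:
--             j = i
--             while j < n and lines[j]:
--                 j += 1
--             records.append(lines[i:j])
--             i = j
--         else:
--             i += 1
--     out: list[dict[str, str]] = []
--     for record in records: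
--         d: dict[str, str] = {}
--         for line in record:
--             key, value = line.split(" ", 1)
--             d[key] = value.strip()
--         out.append({
--             "worktree": d.get("worktree", "").replace("\\", "/"),
--             "branch": d.get("branch", "").removeprefix("refs/heads/"),
--         })
--     return out
-- ===== Notes on version B (the rewrite author's own statement) =====
-- stated objective: alternative
-- what changed: Replaces A's single pass with a mutable accumulator dict and blank-line/trailing flush logic by a two-phase decomposition: strip all lines, group consecutive non-blank lines into records, then build each record's dict and project the two output fields.
import Mathlib
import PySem

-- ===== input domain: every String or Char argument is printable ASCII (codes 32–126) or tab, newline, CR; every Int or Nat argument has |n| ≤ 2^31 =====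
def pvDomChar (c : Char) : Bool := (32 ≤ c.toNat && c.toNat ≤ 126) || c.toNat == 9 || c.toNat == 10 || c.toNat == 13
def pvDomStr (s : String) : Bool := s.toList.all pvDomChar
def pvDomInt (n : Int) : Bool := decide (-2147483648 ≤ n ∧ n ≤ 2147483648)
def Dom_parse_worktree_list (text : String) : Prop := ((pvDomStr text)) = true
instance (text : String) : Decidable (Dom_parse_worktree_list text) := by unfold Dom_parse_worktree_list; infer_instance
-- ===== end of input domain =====

-- B parses in two phases (strip lines, group consecutive non-blank lines into records,
-- then build each record's dict and project the two fields) instead of A's single pass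
-- with a mutable accumulator dict and blank-line flushes; same cost, different shape.

-- ===== PORT A =====
-- str.removeprefix, hand-ported (exact): drop the prefix iff the string starts with it
def pvRemovePrefixA (s p : String) : String :=
  if PySem.Str.startswith s p then String.ofList (s.toList.drop p.toList.length) else s

-- body of A's for-loop; state = (entries, the dict being accumulated)
def pvStepA (st : List (PySem.Dict String String) × PySem.Dict String String)
    (raw_line : String) : List (PySem.Dict String String) × PySem.Dict String String :=
  let line := PySem.Str.strip raw_line
  if PySem.Str.len line = 0 then
    if st.2.items.isEmpty then st else (st.1 ++ [st.2], PySem.Dict.empty)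
  else
    match PySem.Str.splitMax? line " " 1 with
    | some (key :: value :: _) => (st.1, st.2.insert key (PySem.Str.strip value))
    | _ => st   -- Python raises ValueError here; excluded by Pre_

-- the dict built by A's final list comprehension, for one entry
def pvEntryOutA (entry : PySem.Dict String String) : List (String × String) :=
  [("worktree", PySem.Str.replace (entry.getD "worktree" "") "\\" "/"),
   ("branch", pvRemovePrefixA (entry.getD "branch" "") "refs/heads/")]

def parse_worktree_list (text : String) : List (List (String × String)) :=
  let st := (PySem.Str.splitlines text).foldl pvStepA ([], PySem.Dict.empty)
  let entries := if st.2.items.isEmpty then st.1 else st.1 ++ [st.2]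
  entries.map pvEntryOutA

-- ===== PORT B =====
def pvRemovePrefixB (s p : String) : String :=
  if PySem.Str.startswith s p then String.ofList (s.toList.drop p.toList.length) else s

-- truthiness of a (stripped) line
def pvNB (l : String) : Bool := !(PySem.Str.len l == 0)

-- phase 2 of B: group consecutive non-blank lines (the two while loops)
def pvGroups : List String → List (List String)
  | [] => []
  | l :: ls =>
    if pvNB l then (l :: ls.takeWhile pvNB) :: pvGroups (ls.dropWhile pvNB)
    else pvGroups ls
termination_by ls => ls.length
decreasing_by
  · exact Nat.lt_succ_of_le (List.length_dropWhile_le pvNB ls)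
  · exact Nat.lt_succ_self ls.length

-- body of B's inner dict-building loop
def pvStepD (d : PySem.Dict String String) (line : String) : PySem.Dict String String :=
  match PySem.Str.splitMax? line " " 1 with
  | some (key :: value :: _) => d.insert key (PySem.Str.strip value)
  | _ => d   -- Python raises ValueError here; excluded by Pre_

def pvRecordDict (record : List String) : PySem.Dict String String :=
  record.foldl pvStepD PySem.Dict.empty

def pvEntryOutB (d : PySem.Dict String String) : List (String × String) :=
  [("worktree", PySem.Str.replace (d.getD "worktree" "") "\\" "/"),
   ("branch", pvRemovePrefixB (d.getD "branch" "") "refs/heads/")]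

def parse_worktree_list_alt (text : String) : List (List (String × String)) :=
  let lines := (PySem.Str.splitlines text).map PySem.Str.strip
  (pvGroups lines).map (fun r => pvEntryOutB (pvRecordDict r))

-- ===== PRECONDITION & SPEC =====
-- Pre_ excludes exactly the inputs on which A raises ValueError: a line whose stripped
-- form is non-empty yet contains no space, so the key-value split yields a single piece.
def Pre_parse_worktree_list (text : String) : Prop :=
  ((PySem.Str.splitlines text).all (fun l =>
    PySem.Str.len (PySem.Str.strip l) == 0 ||
    ((PySem.Str.splitMax? (PySem.Str.strip l) " " 1).getD []).length == 2)) = true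
instance (text : String) : Decidable (Pre_parse_worktree_list text) := by
  unfold Pre_parse_worktree_list; infer_instance

def pvWitness_parse_worktree_list : String := "worktree C:\\w\nbranch refs/heads/m\n\nworktree /x\n"

def Spec_parse_worktree_list (text : String) (out : List (List (String × String))) : Prop := out = parse_worktree_list_alt text
instance (text : String) (out : List (List (String × String))) : Decidable (Spec_parse_worktree_list text out) := by unfold Spec_parse_worktree_list; infer_instance

-- ===== CLAIM (what is proved, stated in full; the proofs are below) =====
def Claim_equal_parse_worktree_list : Prop := ∀ (text : String), Dom_parse_worktree_list text → Pre_parse_worktree_list text → Spec_parse_worktree_list text (parse_worktree_list text)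

-- ===== LEMMAS AND PROOFS =====

-- the strip-free loop body: pvStepA st raw = pvStepS st (strip raw)
def pvStepS (st : List (PySem.Dict String String) × PySem.Dict String String)
    (line : String) : List (PySem.Dict String String) × PySem.Dict String String :=
  if PySem.Str.len line = 0 then
    if st.2.items.isEmpty then st else (st.1 ++ [st.2], PySem.Dict.empty)
  else (st.1, pvStepD st.2 line)

-- the final flush of A
def pvFinalize (st : List (PySem.Dict String String) × PySem.Dict String String) :
    List (PySem.Dict String String) :=
  if st.2.items.isEmpty then st.1 else st.1 ++ [st.2]

lemma pvStepA_eq_stepS (st : List (PySem.Dict String String) × PySem.Dict String String)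
    (raw : String) : pvStepA st raw = pvStepS st (PySem.Str.strip raw) := by
  simp only [pvStepA, pvStepS, pvStepD]
  split_ifs with h1 h2
  · rfl
  · rfl
  · cases PySem.Str.splitMax? (PySem.Str.strip raw) " " 1 with
    | none => rfl
    | some parts =>
      cases parts with
      | nil => rfl
      | cons k rest =>
        cases rest with
        | nil => rfl
        | cons v r => rfl

lemma pvInsert_ne_empty (d : PySem.Dict String String) (k v : String) :
    (d.insert k v).items.isEmpty = false := by
  simp only [PySem.Dict.insert]
  split_ifs with h
  · cases hd : d.items with
    | nil => simp [PySem.Dict.contains, hd] at h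
    | cons a t => simp
  · simp

lemma pvEmpty_eq (d : PySem.Dict String String) (h : d.items.isEmpty = true) :
    d = PySem.Dict.empty := by
  apply PySem.Dict.ext
  simpa [PySem.Dict.empty, List.isEmpty_iff] using h

lemma pvGroups_nil : pvGroups [] = [] := by rw [pvGroups]

lemma pvGroups_cons_blank (l : String) (ls : List String) (h : pvNB l = false) :
    pvGroups (l :: ls) = pvGroups ls := by
  rw [pvGroups]; simp [h]

lemma pvGroups_cons_nb (l : String) (ls : List String) (h : pvNB l = true) :
    pvGroups (l :: ls) = (l :: ls.takeWhile pvNB) :: pvGroups (ls.dropWhile pvNB) := by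
  rw [pvGroups]; simp [h]

lemma pvFoldS_entries (ls : List String)
    (es : List (PySem.Dict String String)) (cur : PySem.Dict String String) :
    ls.foldl pvStepS (es, cur) =
      (es ++ (ls.foldl pvStepS ([], cur)).1, (ls.foldl pvStepS ([], cur)).2) := by
  induction ls generalizing es cur with
  | nil => simp
  | cons l t ih =>
    simp only [List.foldl_cons, pvStepS]
    split_ifs with h1 h2
    · exact ih es cur
    · simp only [List.nil_append]
      rw [ih (es ++ [cur]) PySem.Dict.empty, ih [cur] PySem.Dict.empty]
      simp
    · exact ih es (pvStepD cur l)

lemma pvFinalize_append (es xs : List (PySem.Dict String String))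
    (c : PySem.Dict String String) :
    pvFinalize (es ++ xs, c) = es ++ pvFinalize (xs, c) := by
  unfold pvFinalize
  split_ifs <;> simp

lemma pvMain (ls : List String) (cur : PySem.Dict String String)
    (hpre : ∀ l ∈ ls, PySem.Str.len l = 0 ∨
      ((PySem.Str.splitMax? l " " 1).getD []).length = 2) :
    pvFinalize (ls.foldl pvStepS ([], cur)) =
      (if cur.items.isEmpty then (pvGroups ls).map pvRecordDict
       else ((ls.takeWhile pvNB).foldl pvStepD cur) ::
         (pvGroups (ls.dropWhile pvNB)).map pvRecordDict) := by
  induction ls generalizing cur with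
  | nil =>
    by_cases h : cur.items.isEmpty <;>
      simp [pvFinalize, pvGroups_nil, h]
  | cons l t ih =>
    have hl := hpre l (by simp)
    have hpt : ∀ x ∈ t, PySem.Str.len x = 0 ∨
        ((PySem.Str.splitMax? x " " 1).getD []).length = 2 :=
      fun x hx => hpre x (by simp [hx])
    by_cases hb : PySem.Str.len l = 0
    · have hl0 : l = "" := by simpa using hb
      have hnb : pvNB l = false := by simp [pvNB, hl0]
      simp only [List.foldl_cons, pvStepS, if_pos hb]
      by_cases hc : cur.items.isEmpty = true
      · rw [if_pos hc, ih cur hpt, if_pos hc, if_pos hc, pvGroups_cons_blank l t hnb]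
      · rw [if_neg hc, if_neg hc]
        simp only [List.nil_append]
        rw [pvFoldS_entries t [cur] PySem.Dict.empty, pvFinalize_append, Prod.mk.eta]
        rw [ih PySem.Dict.empty hpt, if_pos (by simp [PySem.Dict.empty])]
        rw [List.takeWhile_cons_of_neg (by simp [hnb]),
            List.dropWhile_cons_of_neg (by simp [hnb]),
            pvGroups_cons_blank l t hnb]
        simp
    · have hnb : pvNB l = true := by simp [pvNB]; simpa using hb
      have h2 := hl.resolve_left hb
      obtain ⟨k, v, hm⟩ : ∃ k v, PySem.Str.splitMax? l " " 1 = some [k, v] := by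
        cases hm : PySem.Str.splitMax? l " " 1 with
        | none => rw [hm] at h2; simp at h2
        | some parts =>
          rw [hm] at h2
          rcases parts with _ | ⟨k, _ | ⟨v, _ | ⟨w, r⟩⟩⟩ <;> simp at h2
          exact ⟨k, v, rfl⟩
      have hins : (pvStepD cur l).items.isEmpty = false := by
        simp only [pvStepD, hm]
        exact pvInsert_ne_empty cur k (PySem.Str.strip v)
      simp only [List.foldl_cons, pvStepS, if_neg hb]
      rw [ih (pvStepD cur l) hpt, if_neg (by simp [hins])]
      rw [List.takeWhile_cons_of_pos hnb, List.dropWhile_cons_of_pos hnb]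
      by_cases hc : cur.items.isEmpty = true
      · rw [if_pos hc, pvGroups_cons_nb l t hnb]
        have hce : cur = PySem.Dict.empty := pvEmpty_eq cur hc
        simp only [List.map_cons, pvRecordDict, List.foldl_cons, hce]
      · rw [if_neg hc]
        simp only [List.foldl_cons]

lemma pvEntryOut_eq : pvEntryOutA = pvEntryOutB := by
  funext d; rfl

-- ===== VERDICT (by name: the statement is the Claim_ definition above) =====
theorem parse_worktree_list_spec : Claim_equal_parse_worktree_list := by
  intro text _ hpre
  have hfun : pvStepA = (fun st raw => pvStepS st (PySem.Str.strip raw)) :=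
    funext fun st => funext fun raw => pvStepA_eq_stepS st raw
  have hA : (PySem.Str.splitlines text).foldl pvStepA ([], PySem.Dict.empty) =
      ((PySem.Str.splitlines text).map PySem.Str.strip).foldl pvStepS ([], PySem.Dict.empty) := by
    rw [hfun]
    exact List.foldl_map.symm
  have hpre' : ∀ l ∈ (PySem.Str.splitlines text).map PySem.Str.strip,
      PySem.Str.len l = 0 ∨ ((PySem.Str.splitMax? l " " 1).getD []).length = 2 := by
    intro l hl
    rcases List.mem_map.mp hl with ⟨raw, hraw, rfl⟩
    unfold Pre_parse_worktree_list at hpre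
    rw [List.all_eq_true] at hpre
    have h2 := hpre raw hraw
    simp only [Bool.or_eq_true, beq_iff_eq] at h2
    exact h2
  have hmain := pvMain ((PySem.Str.splitlines text).map PySem.Str.strip)
    PySem.Dict.empty hpre'
  rw [if_pos (by simp [PySem.Dict.empty])] at hmain
  have hfin : ∀ st : List (PySem.Dict String String) × PySem.Dict String String,
      (if st.2.items.isEmpty then st.1 else st.1 ++ [st.2]) = pvFinalize st := fun _ => rfl
  unfold Spec_parse_worktree_list parse_worktree_list parse_worktree_list_alt
  simp only [hA, hfin, hmain, List.map_map, pvEntryOut_eq]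
  rfl
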